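-- pv_equiv track=rewrite | github.com/LLNL/FPChecker | tracing_tool/tracing.py | isASupportedCompiler
-- ===== SOURCE A (Python) =====
-- SUPPORTED_COMPILERS = set([
--   'nvcc',
--   'c++',
--   'cc',
--   'gcc',
--   'g++',
--   'xlc',
--   'xlC',
--   'xlc++',
--   'xlc_r',
--   'xlc++_r'
-- ])
--
-- SUPPORTED_TOOLS = set([
--   'ar'
-- ])
--
-- def isASupportedCompiler(line):
--   for compiler in SUPPORTED_COMPILERS:
--     if line.endswith('/'+compiler):
--       return True
--
--   for tool in SUPPORTED_TOOLS:
--     if line.endswith('/'+tool):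
--       return True
--
--   return False
-- ===== SOURCE B (Python) =====
-- SUPPORTED_COMPILERS = set([
--   'nvcc',
--   'c++',
--   'cc',
--   'gcc',
--   'g++',
--   'xlc',
--   'xlC',
--   'xlc++',
--   'xlc_r',
--   'xlc++_r'
-- ])
--
-- SUPPORTED_TOOLS = set([
--   'ar'
-- ])
--
-- _NAMES = SUPPORTED_COMPILERS | SUPPORTED_TOOLS
--
-- def isASupportedCompiler(line):
--   # one reverse scan: collect the final path component, then a single membership test
--   name = []
--   for ch in reversed(line):
--     if ch == '/':
--       return ''.join(reversed(name)) in _NAMES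
--     name.append(ch)
--   return False
-- ===== Notes on version B (the rewrite author's own statement) =====
-- stated objective: alternative
-- what changed: Replaces A's eleven separate endswith suffix tests (one per candidate name) with a single reverse scan that extracts the final path component once and does one set-membership test.
import Mathlib
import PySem

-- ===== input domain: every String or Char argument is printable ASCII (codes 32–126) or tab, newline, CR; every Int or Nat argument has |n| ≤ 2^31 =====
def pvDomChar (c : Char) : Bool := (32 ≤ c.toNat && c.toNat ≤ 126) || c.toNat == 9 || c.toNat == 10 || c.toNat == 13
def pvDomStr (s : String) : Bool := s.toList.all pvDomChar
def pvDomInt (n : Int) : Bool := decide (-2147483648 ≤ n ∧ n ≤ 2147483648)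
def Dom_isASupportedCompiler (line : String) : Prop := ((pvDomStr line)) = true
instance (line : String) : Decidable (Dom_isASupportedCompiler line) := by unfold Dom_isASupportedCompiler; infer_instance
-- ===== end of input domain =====

-- B replaces A's eleven per-name endswith suffix tests by one reverse scan that extracts
-- the final path component and does a single set-membership test (objective: alternative).

-- ===== PORT A =====
def supportedCompilers : List String :=
  ["nvcc", "c++", "cc", "gcc", "g++", "xlc", "xlC", "xlc++", "xlc_r", "xlc++_r"]

def supportedTools : List String := ["ar"]

def isASupportedCompiler (line : String) : Bool :=
  if supportedCompilers.any (fun compiler => PySem.Str.endswith line ("/" ++ compiler)) then true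
  else if supportedTools.any (fun tool => PySem.Str.endswith line ("/" ++ tool)) then true
  else false

-- ===== PORT B =====
-- _NAMES = SUPPORTED_COMPILERS | SUPPORTED_TOOLS
def altNames : PySem.Set String :=
  PySem.Set.ofList (["nvcc", "c++", "cc", "gcc", "g++", "xlc", "xlC", "xlc++", "xlc_r", "xlc++_r"] ++ ["ar"])

-- the reverse for-loop of Source B: `name` is the accumulator, early return at '/'
def altScan : List Char → List Char → Bool
  | [], _ => false
  | ch :: rest, name =>
      if ch = '/' then altNames.contains (String.ofList name.reverse)
      else altScan rest (name ++ [ch])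

def isASupportedCompiler_alt (line : String) : Bool :=
  altScan line.toList.reverse []

-- ===== PRECONDITION & SPEC =====
def Spec_isASupportedCompiler (line : String) (out : Bool) : Prop := out = isASupportedCompiler_alt line
instance (line : String) (out : Bool) : Decidable (Spec_isASupportedCompiler line out) := by unfold Spec_isASupportedCompiler; infer_instance

-- ===== CLAIM (what is proved, stated in full; the proofs are below) =====
def Claim_equal_isASupportedCompiler : Prop := ∀ (line : String), Dom_isASupportedCompiler line → Spec_isASupportedCompiler line (isASupportedCompiler line)

-- ===== LEMMAS AND PROOFS =====

theorem key_prefix (u rl : List Char) (h : '/' ∉ u) :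
    (u ++ ['/'] <+: rl) ↔ (rl.takeWhile (fun x => !(x == '/')) = u ∧ '/' ∈ rl) := by
  induction u generalizing rl with
  | nil =>
      cases rl with
      | nil => simp
      | cons a t =>
          constructor
          · rintro ⟨s, hs⟩
            simp at hs
            obtain ⟨ha, ht⟩ := hs
            subst ha
            simp
          · rintro ⟨htw, hmem⟩
            simp only [List.takeWhile_cons] at htw
            by_cases ha : a = '/'
            · subst ha; exact ⟨t, by simp⟩
            · simp [ha] at htw
  | cons x u' ih =>
      have hx : x ≠ '/' := fun hx => h (by simp [hx])
      have hu' : '/' ∉ u' := fun hm => h (by simp [hm])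
      cases rl with
      | nil => constructor
               · rintro ⟨s, hs⟩; simp at hs
               · rintro ⟨_, hmem⟩; simp at hmem
      | cons a t =>
          rw [List.cons_append, List.cons_prefix_cons]
          constructor
          · rintro ⟨ha, hpre⟩
            subst ha
            obtain ⟨htw, hmem⟩ := (ih t hu').mp hpre
            refine ⟨?_, by simp [hmem]⟩
            simp [hx, htw]
          · rintro ⟨htw, hmem⟩
            simp only [List.takeWhile_cons] at htw
            by_cases ha : a = '/'
            · simp [ha] at htw
            · have hcons : a :: t.takeWhile (fun x => !(x == '/')) = x :: u' := by
                simpa [ha] using htw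
              obtain ⟨hax, htt⟩ := List.cons_eq_cons.mp hcons
              have hmem' : '/' ∈ t := by
                rcases List.mem_cons.mp hmem with h' | h'
                · exact absurd h'.symm ha
                · exact h'
              exact ⟨hax.symm, (ih t hu').mpr ⟨htt, hmem'⟩⟩

theorem altScan_eq (rl name : List Char) :
    altScan rl name =
      if '/' ∈ rl then altNames.contains (String.ofList ((name ++ rl.takeWhile (fun x => !(x == '/')))).reverse)
      else false := by
  induction rl generalizing name with
  | nil => simp [altScan]
  | cons c rest ih =>
      by_cases hc : c = '/'
      · subst hc; simp [altScan]
      · rw [show altScan (c :: rest) name = altScan rest (name ++ [c]) from by simp [altScan, hc],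
          ih (name ++ [c])]
        simp [hc, Ne.symm hc]

theorem names_no_slash : ∀ c ∈ altNames, '/' ∉ c.toList := by decide

theorem endswith_iff_char (line : String) (c : String) (hc : '/' ∉ c.toList) :
    PySem.Str.endswith line ("/" ++ c) = true ↔
      (line.toList.reverse.takeWhile (fun x => !(x == '/')) = c.toList.reverse ∧ '/' ∈ line.toList.reverse) := by
  have h1 : PySem.Str.endswith line ("/" ++ c) = true ↔ ('/' :: c.toList) <:+ line.toList := by
    simp [PySem.Chars.endswith_iff]
  have h2 : ('/' :: c.toList) <:+ line.toList ↔
      (c.toList.reverse ++ ['/'] <+: line.toList.reverse) := by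
    rw [← List.reverse_prefix]; simp
  rw [h1, h2, key_prefix _ _ (by simpa using hc)]

theorem alt_mem_iff (u : List Char) :
    altNames.contains (String.ofList u.reverse) = true ↔ ∃ c ∈ altNames, c.toList.reverse = u := by
  rw [PySem.Set.contains_iff]
  constructor
  · intro hmem
    exact ⟨String.ofList u.reverse, hmem, by simp⟩
  · rintro ⟨c, hmem, heq⟩
    have : String.ofList u.reverse = c := by
      rw [← heq]; simp
    rwa [this]

theorem names_split : (altNames : List String) = supportedCompilers ++ supportedTools := by decide


-- ===== VERDICT (by name: the statement is the Claim_ definition above) =====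
theorem isASupportedCompiler_spec : Claim_equal_isASupportedCompiler := by
  intro line _
  unfold Spec_isASupportedCompiler
  have hA : isASupportedCompiler line =
      altNames.any (fun c => PySem.Str.endswith line ("/" ++ c)) := by
    unfold isASupportedCompiler
    rw [names_split, List.any_append]
    cases supportedCompilers.any (fun c => PySem.Str.endswith line ("/" ++ c)) <;>
      cases supportedTools.any (fun c => PySem.Str.endswith line ("/" ++ c)) <;> simp
  rw [hA]
  unfold isASupportedCompiler_alt
  rw [altScan_eq, List.nil_append]
  by_cases hmem : '/' ∈ line.toList.reverse
  · rw [if_pos hmem, Bool.eq_iff_iff]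
    constructor
    · intro hb
      obtain ⟨c, hcm, he⟩ := List.any_eq_true.mp hb
      obtain ⟨htw, -⟩ := (endswith_iff_char line c (names_no_slash c hcm)).mp he
      exact (alt_mem_iff _).mpr ⟨c, hcm, htw.symm⟩
    · intro hb
      obtain ⟨c, hcm, hceq⟩ := (alt_mem_iff _).mp hb
      exact List.any_eq_true.mpr
        ⟨c, hcm, (endswith_iff_char line c (names_no_slash c hcm)).mpr ⟨hceq.symm, hmem⟩⟩
  · rw [if_neg hmem]
    apply List.any_eq_false.mpr
    intro c hcm hval
    exact absurd ((endswith_iff_char line c (names_no_slash c hcm)).mp hval).2 hmem
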